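-- pv_equiv track=rewrite | github.com/ChangLabSNU/VaxLab-report | vaxlab_report/sequence_evaluator.py | find_stems
-- ===== SOURCE A (Python) =====
-- from typing import Dict, List, Any, Optional, Tuple
--
-- def find_stems(structure: str) -> List[List[List[int]]]:
--     """Finds stem structures (paired regions) in dot-bracket notation."""
--     stack = []
--     stemgroups = []
--     for i, s in enumerate(structure):
--         if s == '(':
--             stack.append(i)
--         elif s == ')':
--             if not stack: continue
--             peer = stack.pop()
--             is_contiguous = False
--             if stemgroups:
--                 # Check for simple adjacency
--                 if stemgroups and peer == stemgroups[-1][0][-1] - 1 and i == stemgroups[-1][1][-1] + 1: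
--                     is_contiguous = True
--
--             if is_contiguous:
--                 stemgroups[-1][0].append(peer)
--                 stemgroups[-1][1].append(i)
--             else:
--                 stemgroups.append([[peer], [i]])
--     stemgroups.sort(key=lambda x: x[0][0])
--     return stemgroups
-- ===== SOURCE B (Python) =====
-- def find_stems(structure):
--     """Finds stem structures (paired regions) in dot-bracket notation."""
--     # Pass 1: match brackets once, recording each opening index -> closing index.
--     stack = []
--     table = {}
--     for i, s in enumerate(structure):
--         if s == '(':
--             stack.append(i)
--         elif s == ')' and stack:
--             table[stack.pop()] = i
--     # Pass 2: walk openings from innermost to outermost (descending); a pair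
--     # extends the current stem exactly when it wraps the previous pair.
--     stems = []
--     for o in sorted(table, reverse=True):
--         c = table[o]
--         if stems and stems[-1][0][-1] == o + 1 and stems[-1][1][-1] == c - 1:
--             stems[-1][0].append(o)
--             stems[-1][1].append(c)
--         else:
--             stems.append([[o], [c]])
--     stems.reverse()
--     return stems
-- ===== Notes on version B (the rewrite author's own statement) =====
-- stated objective: alternative
-- what changed: B first builds an opening-index -> closing-index pairing table with one stack pass, then forms the stems by scanning the matched openers in descending order, so the stem groups come out already ordered and A's final sort of the group list disappears.
import Mathlib
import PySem

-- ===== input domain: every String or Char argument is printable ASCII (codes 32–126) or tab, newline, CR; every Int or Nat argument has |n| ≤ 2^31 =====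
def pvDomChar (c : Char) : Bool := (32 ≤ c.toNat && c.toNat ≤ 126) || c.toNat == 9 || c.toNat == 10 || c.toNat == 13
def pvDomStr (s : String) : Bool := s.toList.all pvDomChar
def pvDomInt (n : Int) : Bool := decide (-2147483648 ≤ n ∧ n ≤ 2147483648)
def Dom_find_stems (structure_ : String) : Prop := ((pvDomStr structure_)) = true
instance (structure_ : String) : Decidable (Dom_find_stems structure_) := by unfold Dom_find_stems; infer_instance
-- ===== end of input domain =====

-- B replaces A's interleaved grouping-plus-final-sort by a pairing-table pass and a
-- descending scan over matched openers that emits the stems already in order (alternative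
-- algorithm, same cost).

-- ===== PORT A =====
-- Python's `stack` is kept head-first (head = top of stack); `stemgroups` is kept
-- head-first as well (head = most recently appended group), so it is reversed before the
-- final sort; each group is the pair (openings, closings) with both lists in Python order.
def pvToGroup (g : List Int × List Int) : List (List Int) := [g.1, g.2]

def pvLoopA : List (Int × Char) → List Int → List (List Int × List Int) →
    List Int × List (List Int × List Int)
  | [], stack, stems => (stack, stems)
  | (i, s) :: rest, stack, stems =>
    if s = '(' then
      pvLoopA rest (i :: stack) stems
    else if s = ')' then
      match stack with
      | [] => pvLoopA rest [] stems                     -- if not stack: continue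
      | peer :: stack' =>
        match stems with
        | (op, cl) :: tail =>
          -- is_contiguous: peer == stemgroups[-1][0][-1] - 1 and i == stemgroups[-1][1][-1] + 1
          if peer == PySem.List.pyGetD op (-1) 0 - 1 && i == PySem.List.pyGetD cl (-1) 0 + 1 then
            pvLoopA rest stack' ((op ++ [peer], cl ++ [i]) :: tail)
          else
            pvLoopA rest stack' (([peer], [i]) :: (op, cl) :: tail)
        | [] => pvLoopA rest stack' [([peer], [i])]     -- `if stemgroups:` is False
    else
      pvLoopA rest stack stems

def find_stems (structure_ : String) : List (List (List Int)) :=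
  let r := pvLoopA (PySem.List.enumerate structure_.toList 0) [] []
  PySem.List.sorted (r.2.reverse.map pvToGroup)
    (fun x => PySem.List.pyGetD (PySem.List.pyGetD x 0 []) 0 0) false

-- ===== PORT B =====
-- Python's dict `table` is a PySem.Dict built by the first stack pass; `stems` is kept
-- head-first (head = most recently appended), so Python's final in-place reverse makes the
-- head-first list itself the returned order.
def pvLoopTable : List (Int × Char) → List Int → PySem.Dict Int Int →
    List Int × PySem.Dict Int Int
  | [], stack, table => (stack, table)
  | (i, s) :: rest, stack, table =>
    if s = '(' then pvLoopTable rest (i :: stack) table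
    else if s = ')' then
      match stack with
      | [] => pvLoopTable rest [] table
      | o :: stack' => pvLoopTable rest stack' (table.insert o i)
    else pvLoopTable rest stack table

def pvLoopB : List Int → PySem.Dict Int Int → List (List Int × List Int) →
    List (List Int × List Int)
  | [], _, stems => stems
  | o :: rest, table, stems =>
    let c := table.getD o 0        -- c = table[o]; o is drawn from table's keys, so present
    match stems with
    | (op, cl) :: tail =>
      if PySem.List.pyGetD op (-1) 0 == o + 1 && PySem.List.pyGetD cl (-1) 0 == c - 1 then
        pvLoopB rest table ((op ++ [o], cl ++ [c]) :: tail)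
      else
        pvLoopB rest table (([o], [c]) :: (op, cl) :: tail)
    | [] => pvLoopB rest table [([o], [c])]

def find_stems_alt (structure_ : String) : List (List (List Int)) :=
  let t := pvLoopTable (PySem.List.enumerate structure_.toList 0) [] PySem.Dict.empty
  let stems := pvLoopB (PySem.List.sorted t.2.keys (fun k => k) true) t.2 []
  stems.map pvToGroup

-- ===== PRECONDITION & SPEC =====
def Spec_find_stems (structure_ : String) (out : List (List (List Int))) : Prop := out = find_stems_alt structure_
instance (structure_ : String) (out : List (List (List Int))) : Decidable (Spec_find_stems structure_ out) := by unfold Spec_find_stems; infer_instance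

-- ===== CLAIM (what is proved, stated in full; the proofs are below) =====
def Claim_equal_find_stems : Prop := ∀ (structure_ : String), Dom_find_stems structure_ → Spec_find_stems structure_ (find_stems structure_)

-- ===== LEMMAS AND PROOFS =====

-- proof-side vocabulary: a matched pair (opening index, closing index); `pvSucc` is the
-- enclosing pair one step outward, `pvInn` the enclosed pair one step inward.
def pvSucc (p : Int × Int) : Int × Int := (p.1 - 1, p.2 + 1)
def pvInn (p : Int × Int) : Int × Int := (p.1 + 1, p.2 - 1)

-- the pure matching pass: pairs in closing order (head = earliest closing)
def pvPairs : List (Int × Char) → List Int → List Int × List (Int × Int)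
  | [], st => (st, [])
  | (i, s) :: rest, st =>
    if s = '(' then pvPairs rest (i :: st)
    else if s = ')' then
      match st with
      | [] => pvPairs rest []
      | o :: st' =>
        let r := pvPairs rest st'
        (r.1, (o, i) :: r.2)
    else pvPairs rest st

-- one grouping step over pair-level runs; a run is (first pair, later pairs in scan order)
def pvStep (gs : List ((Int × Int) × List (Int × Int))) (q : Int × Int) :
    List ((Int × Int) × List (Int × Int)) :=
  match gs with
  | (h, t) :: tail =>
    if t.getLastD h = pvInn q then (h, t ++ [q]) :: tail else (q, []) :: (h, t) :: tail
  | [] => [(q, [])]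

def pvRunG (r : (Int × Int) × List (Int × Int)) : List Int × List Int :=
  ((r.1 :: r.2).map Prod.fst, (r.1 :: r.2).map Prod.snd)

-- maximal linked prefix (tail after p) and the remainder
def pvTakeT (p : Int × Int) : List (Int × Int) → List (Int × Int)
  | [] => []
  | q :: rest => if q = pvSucc p then q :: pvTakeT q rest else []

def pvDropT (p : Int × Int) : List (Int × Int) → List (Int × Int)
  | [] => []
  | q :: rest => if q = pvSucc p then pvDropT q rest else q :: rest

-- the chain continuing outward from q, following pvSucc while it stays in U
def pvChainT (U : List (Int × Int)) : Nat → (Int × Int) → List (Int × Int)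
  | 0, _ => []
  | n + 1, q => if pvSucc q ∈ U then pvSucc q :: pvChainT U n (pvSucc q) else []

-- scan orders we use put the enclosed pair immediately before its enclosing pair
def pvAdj (S : List (Int × Int)) : Prop :=
  ∀ xs q ys, S = xs ++ q :: ys → pvSucc q ∈ S → ys.head? = some (pvSucc q)

def pvSpecRuns (S : List (Int × Int)) (n : Nat) : List ((Int × Int) × List (Int × Int)) :=
  (S.filter (fun q => !decide (pvInn q ∈ S))).map (fun q => (q, pvChainT S n q))

lemma pvSucc_inn (q : Int × Int) : pvSucc (pvInn q) = q := by
  simp [pvSucc, pvInn]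

lemma pvEq_succ_iff (p q : Int × Int) : q = pvSucc p ↔ p = pvInn q := by
  rcases p with ⟨a, b⟩; rcases q with ⟨c, d⟩
  simp [pvSucc, pvInn, Prod.ext_iff]; omega

lemma pv_getLast_cons {α : Type} (h : α) (t : List α) (hne : h :: t ≠ []) :
    (h :: t).getLast hne = t.getLastD h := by
  induction t generalizing h with
  | nil => simp
  | cons b t' ih =>
    rw [List.getLast_cons (List.cons_ne_nil b t'), ih, List.getLastD_cons]

lemma pv_pyGetD_last (f : Int × Int → Int) (h : Int × Int) (t : List (Int × Int)) :
    PySem.List.pyGetD (f h :: t.map f) (-1) 0 = f (t.getLastD h) := by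
  show PySem.List.pyGetD ((h :: t).map f) (-1) 0 = f (t.getLastD h)
  rw [PySem.List.pyGetD_neg_one ((h :: t).map f) 0 (by simp), List.getLast_map,
    pv_getLast_cons]

lemma pv_condA (a b : Int) (x : Int × Int) :
    ((a == x.1 - 1) && (b == x.2 + 1)) = decide (x = pvInn (a, b)) := by
  rcases x with ⟨u, v⟩
  apply Bool.eq_iff_iff.mpr
  simp only [Bool.and_eq_true, beq_iff_eq, decide_eq_true_eq, pvInn, Prod.mk.injEq]
  constructor <;> rintro ⟨h1, h2⟩ <;> constructor <;> omega

lemma pv_condB (o c : Int) (x : Int × Int) :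
    ((x.1 == o + 1) && (x.2 == c - 1)) = decide (x = pvInn (o, c)) := by
  rcases x with ⟨u, v⟩
  apply Bool.eq_iff_iff.mpr
  simp only [Bool.and_eq_true, beq_iff_eq, decide_eq_true_eq, pvInn, Prod.mk.injEq]

-- A's loop is the pure matching pass fused with the pair-level grouping fold
lemma pv_fuseA : ∀ (l : List (Int × Char)) (st : List Int)
    (gs : List ((Int × Int) × List (Int × Int))),
    pvLoopA l st (gs.map pvRunG) =
      ((pvPairs l st).1, ((pvPairs l st).2.foldl pvStep gs).map pvRunG) := by
  intro l
  induction l with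
  | nil => intro st gs; rfl
  | cons x rest ih =>
    rcases x with ⟨i, s⟩
    intro st gs
    by_cases hs : s = '('
    · simp only [pvLoopA, pvPairs, if_pos hs]; exact ih _ _
    · by_cases hs2 : s = ')'
      · cases st with
        | nil => simp only [pvLoopA, pvPairs, if_neg hs, if_pos hs2]; exact ih _ _
        | cons o st' =>
          cases gs with
          | nil =>
            simp only [pvLoopA, pvPairs, if_neg hs, if_pos hs2, List.map_nil]
            have h1 := ih st' [((o, i), [])]
            simp only [pvRunG, List.map] at h1
            simpa [pvStep] using h1
          | cons g gs' =>
            rcases g with ⟨h, t⟩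
            simp only [pvLoopA, pvPairs, if_neg hs, if_pos hs2, List.map_cons, pvRunG]
            rw [pv_pyGetD_last, pv_pyGetD_last, pv_condA]
            by_cases hc : t.getLastD h = pvInn (o, i)
            · rw [if_pos (by simpa using hc)]
              have hc' : t.getLast?.getD h = pvInn (o, i) := by
                rw [← List.getLastD_eq_getLast?]; exact hc
              have h1 := ih st' ((h, t ++ [(o, i)]) :: gs')
              simp only [List.map_cons, pvRunG] at h1
              simpa [pvStep, hc, hc'] using h1
            · rw [if_neg (by simpa using hc)]
              have hc' : ¬(t.getLast?.getD h = pvInn (o, i)) := by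
                rw [← List.getLastD_eq_getLast?]; exact hc
              have h1 := ih st' (((o, i), []) :: (h, t) :: gs')
              simp only [List.map_cons, pvRunG] at h1
              simpa [pvStep, hc, hc'] using h1
      · simp only [pvLoopA, pvPairs, if_neg hs, if_neg hs2]; exact ih _ _

-- B's grouping loop is the same fold over the looked-up pairs
lemma pv_fuseB : ∀ (ks : List Int) (table : PySem.Dict Int Int)
    (gs : List ((Int × Int) × List (Int × Int))),
    pvLoopB ks table (gs.map pvRunG) =
      ((ks.map (fun o => (o, table.getD o 0))).foldl pvStep gs).map pvRunG := by
  intro ks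
  induction ks with
  | nil => intro table gs; rfl
  | cons o rest ih =>
    intro table gs
    cases gs with
    | nil =>
      simp only [pvLoopB, List.map_nil, List.map_cons, List.foldl_cons]
      have h1 := ih table [((o, table.getD o 0), [])]
      simp only [List.map_cons, List.map_nil, pvRunG] at h1
      simpa [pvStep] using h1
    | cons g gs' =>
      rcases g with ⟨h, t⟩
      simp only [pvLoopB, List.map_cons, pvRunG, List.foldl_cons]
      rw [pv_pyGetD_last, pv_pyGetD_last, pv_condB]
      by_cases hc : t.getLastD h = pvInn (o, table.getD o 0)
      · rw [if_pos (by simpa using hc)]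
        have hc' : t.getLast?.getD h = pvInn (o, table.getD o 0) := by
          rw [← List.getLastD_eq_getLast?]; exact hc
        have h1 := ih table ((h, t ++ [(o, table.getD o 0)]) :: gs')
        simp only [List.map_cons, pvRunG] at h1
        simpa [pvStep, hc, hc'] using h1
      · rw [if_neg (by simpa using hc)]
        have hc' : ¬(t.getLast?.getD h = pvInn (o, table.getD o 0)) := by
          rw [← List.getLastD_eq_getLast?]; exact hc
        have h1 := ih table (((o, table.getD o 0), []) :: (h, t) :: gs')
        simp only [List.map_cons, pvRunG] at h1
        simpa [pvStep, hc, hc'] using h1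

-- runs below the top are never touched again
lemma pv_step_tail : ∀ (S : List (Int × Int)) (r : (Int × Int) × List (Int × Int))
    (tail : List ((Int × Int) × List (Int × Int))),
    List.foldl pvStep (r :: tail) S = List.foldl pvStep [r] S ++ tail := by
  intro S
  induction S with
  | nil => intro r tail; rfl
  | cons q S' ih =>
    intro r tail
    rcases r with ⟨h, t⟩
    simp only [List.foldl_cons, pvStep]
    by_cases hc : t.getLastD h = pvInn q
    · rw [if_pos hc, if_pos hc]; exact ih _ _
    · rw [if_neg hc, if_neg hc]
      rw [ih ((q, [])) ((h, t) :: tail), ih ((q, [])) [(h, t)]]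
      simp

-- a fully linked suffix extends the open run to the end
lemma pv_run : ∀ (t : List (Int × Int)) (h : Int × Int) (tacc : List (Int × Int)),
    List.IsChain (fun a b => b = pvSucc a) (tacc.getLastD h :: t) →
    List.foldl pvStep [(h, tacc)] t = [(h, tacc ++ t)] := by
  intro t
  induction t with
  | nil => intro h tacc _; simp
  | cons b t' ih =>
    intro h tacc hch
    cases hch with
    | cons_cons hb hch' =>
      simp only [List.foldl_cons, pvStep]
      rw [if_pos ((pvEq_succ_iff _ _).mp hb)]
      have hlast : (tacc ++ [b]).getLastD h = b := by simp
      have h1 := ih h (tacc ++ [b]) (by rw [hlast]; exact hch')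
      simpa using h1

lemma pvTakeT_dropT : ∀ (rest : List (Int × Int)) (p : Int × Int),
    pvTakeT p rest ++ pvDropT p rest = rest := by
  intro rest
  induction rest with
  | nil => intro p; rfl
  | cons q rest' ih =>
    intro p
    simp only [pvTakeT, pvDropT]
    by_cases hc : q = pvSucc p
    · rw [if_pos hc, if_pos hc]; simp [ih q]
    · rw [if_neg hc, if_neg hc]; simp

lemma pvDropT_length : ∀ (rest : List (Int × Int)) (p : Int × Int),
    (pvDropT p rest).length ≤ rest.length := by
  intro rest
  induction rest with
  | nil => intro p; simp [pvDropT]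
  | cons q rest' ih =>
    intro p
    simp only [pvDropT]
    by_cases hc : q = pvSucc p
    · rw [if_pos hc]; exact Nat.le_succ_of_le (ih q)
    · rw [if_neg hc]

lemma pvTakeT_chain : ∀ (rest : List (Int × Int)) (p : Int × Int),
    List.IsChain (fun a b => b = pvSucc a) (p :: pvTakeT p rest) := by
  intro rest
  induction rest with
  | nil => intro p; exact List.IsChain.singleton p
  | cons q rest' ih =>
    intro p
    simp only [pvTakeT]
    by_cases hc : q = pvSucc p
    · rw [if_pos hc]; exact List.IsChain.cons_cons hc (ih q)
    · rw [if_neg hc]; exact List.IsChain.singleton p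

lemma pvTakeT_break : ∀ (rest : List (Int × Int)) (p q₂ : Int × Int)
    (t₂ : List (Int × Int)), pvDropT p rest = q₂ :: t₂ →
    q₂ ≠ pvSucc ((pvTakeT p rest).getLastD p) := by
  intro rest
  induction rest with
  | nil => intro p q₂ t₂ h; simp [pvDropT] at h
  | cons q rest' ih =>
    intro p q₂ t₂ h
    simp only [pvDropT] at h
    by_cases hc : q = pvSucc p
    · rw [if_pos hc] at h
      simpa only [pvTakeT, if_pos hc, List.getLastD_cons] using ih q q₂ t₂ h
    · rw [if_neg hc] at h
      obtain ⟨rfl, rfl⟩ : q = q₂ ∧ rest' = t₂ := by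
        exact ⟨(List.cons.injEq _ _ _ _ ▸ h).1, (List.cons.injEq _ _ _ _ ▸ h).2⟩
      simpa only [pvTakeT, if_neg hc, List.getLastD_nil] using hc

lemma pv_chain_pred {R : Int × Int → Int × Int → Prop} :
    ∀ (t : List (Int × Int)) (a : Int × Int), List.IsChain R (a :: t) →
    ∀ x ∈ t, ∃ y ∈ a :: t, R y x := by
  intro t
  induction t with
  | nil => intro a _ x hx; simp at hx
  | cons b t' ih =>
    intro a hch x hx
    cases hch with
    | cons_cons hab hch' =>
      rcases List.mem_cons.mp hx with rfl | hx'
      · exact ⟨a, List.mem_cons_self .., hab⟩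
      · obtain ⟨y, hy, hR⟩ := ih b hch' x hx'
        exact ⟨y, List.mem_cons_of_mem _ hy, hR⟩

lemma pv_chainT_eq : ∀ (t : List (Int × Int)) (q : Int × Int) (fuel : Nat)
    (U : List (Int × Int)),
    List.IsChain (fun a b => b = pvSucc a) (q :: t) →
    (∀ x ∈ t, x ∈ U) →
    pvSucc (t.getLastD q) ∉ U →
    t.length ≤ fuel →
    pvChainT U fuel q = t := by
  intro t
  induction t with
  | nil =>
    intro q fuel U _ _ hlast _
    cases fuel with
    | zero => rfl
    | succ n =>
      simp only [pvChainT]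
      rw [if_neg (by simpa using hlast)]
  | cons b t' ih =>
    intro q fuel U hch hmem hlast hlen
    cases hch with
    | cons_cons hb hch' =>
      cases fuel with
      | zero => simp at hlen
      | succ n =>
        simp only [pvChainT]
        rw [if_pos (hb ▸ hmem b (List.mem_cons_self ..))]
        rw [← hb]
        congr 1
        apply ih b n U hch' (fun x hx => hmem x (List.mem_cons_of_mem _ hx))
        · simpa only [List.getLastD_cons] using hlast
        · simpa using Nat.le_of_succ_le_succ hlen

lemma pv_chainT_congr : ∀ (fuel : Nat) (q : Int × Int) (U V : List (Int × Int)),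
    (∀ x, x ∈ U ↔ x ∈ V) → pvChainT U fuel q = pvChainT V fuel q := by
  intro fuel
  induction fuel with
  | zero => intro q U V _; rfl
  | succ n ih =>
    intro q U V h
    simp only [pvChainT]
    by_cases hq : pvSucc q ∈ U
    · rw [if_pos hq, if_pos ((h _).mp hq), ih _ _ _ h]
    · rw [if_neg hq, if_neg (fun hv => hq ((h _).mpr hv))]

lemma pv_chainT_sub : ∀ (fuel : Nat) (q : Int × Int) (S S₂ : List (Int × Int)),
    q ∈ S₂ → (∀ y ∈ S₂, (pvSucc y ∈ S ↔ pvSucc y ∈ S₂)) →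
    pvChainT S fuel q = pvChainT S₂ fuel q := by
  intro fuel
  induction fuel with
  | zero => intro q S S₂ _ _; rfl
  | succ n ih =>
    intro q S S₂ hq h
    simp only [pvChainT]
    by_cases hin : pvSucc q ∈ S₂
    · rw [if_pos ((h q hq).mpr hin), if_pos hin, ih _ _ _ hin h]
    · rw [if_neg (fun hs => hin ((h q hq).mp hs)), if_neg hin]

lemma pv_adj_of_pairwise (f : Int × Int → Int) (hf : ∀ q, f (pvSucc q) = f q + 1)
    (S : List (Int × Int)) (hp : S.Pairwise (fun a b => f a < f b)) : pvAdj S := by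
  intro xs q ys hS hmem
  subst hS
  rcases List.mem_append.mp hmem with hx | hqy
  · exfalso
    have hR := (List.pairwise_append.mp hp).2.2 _ hx q (List.mem_cons_self ..)
    have := hf q
    omega
  · rcases List.mem_cons.mp hqy with heq | hys
    · exfalso
      have h1 := hf q
      rw [heq] at h1
      omega
    · cases ys with
      | nil => simp at hys
      | cons y ys' =>
        have hqlt : f q < f y :=
          (List.pairwise_cons.mp (List.pairwise_append.mp hp).2.1).1 y
            (List.mem_cons_self ..)
        rcases List.mem_cons.mp hys with heq | hys'
        · rw [heq]; rfl
        · exfalso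
          have hylt : f y < f (pvSucc q) :=
            ((List.pairwise_cons.mp (List.pairwise_cons.mp
              (List.pairwise_append.mp hp).2.1).2).1) _ hys'
          have := hf q
          omega

-- the main characterisation: the grouping fold yields exactly the maximal chains,
-- latest-started first
lemma pv_runs_eq : ∀ (n : Nat) (S : List (Int × Int)), S.length ≤ n →
    ∀ fuel, S.length ≤ fuel → pvAdj S → S.Nodup →
    S.foldl pvStep [] = (pvSpecRuns S fuel).reverse := by
  intro n
  induction n with
  | zero =>
    intro S hlen
    have hS : S = [] := by cases S with | nil => rfl | cons a t => simp at hlen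
    subst hS
    intro fuel _ _ _
    simp [pvSpecRuns]
  | succ n ih =>
    intro S hlen fuel hfuel hadj hnd
    cases S with
    | nil => simp [pvSpecRuns]
    | cons p rest =>
      set C' := pvTakeT p rest with hC'
      set S₂ := pvDropT p rest with hS₂
      have hTD : (p :: C') ++ S₂ = p :: rest := by
        simp only [List.cons_append, List.cons.injEq, true_and]
        exact pvTakeT_dropT rest p
      have hchain := pvTakeT_chain rest p
      have hsub₂ : ∀ x ∈ S₂, x ∈ p :: rest := by
        intro x hx; rw [← hTD]; exact List.mem_append_right _ hx
      have hsubC : ∀ x ∈ p :: C', x ∈ p :: rest := by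
        intro x hx; rw [← hTD]; exact List.mem_append_left _ hx
      have hnd' : ((p :: C') ++ S₂).Nodup := by rw [hTD]; exact hnd
      have hnd₂ : S₂.Nodup := (List.nodup_append.mp hnd').2.1
      have hdisj : ∀ a ∈ p :: C', a ∉ S₂ := by
        intro a ha hb
        exact (List.nodup_append.mp hnd').2.2 a ha a hb rfl
      have hadj₂ : pvAdj S₂ := by
        intro xs q ys hsp hsucc
        exact hadj ((p :: C') ++ xs) q ys
          (by rw [← hTD, hsp]; simp) (hsub₂ _ hsucc)
      have hlastout : pvSucc (C'.getLastD p) ∉ p :: rest := by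
        intro hmem
        have hglast : (p :: C').getLast (List.cons_ne_nil _ _) = C'.getLastD p :=
          pv_getLast_cons _ _ _
        have hdecomp : p :: rest = (p :: C').dropLast ++ (C'.getLastD p) :: S₂ := by
          rw [← hTD]
          conv_lhs => rw [← List.dropLast_append_getLast (List.cons_ne_nil p C')]
          rw [hglast, List.append_assoc]
          rfl
        have hhd := hadj _ _ _ hdecomp hmem
        cases hS2eq : S₂ with
        | nil => rw [hS2eq] at hhd; simp at hhd
        | cons q₂ t₂ =>
          rw [hS2eq] at hhd
          simp only [List.head?_cons, Option.some.injEq] at hhd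
          exact pvTakeT_break rest p q₂ t₂ (by rw [← hS₂]; exact hS2eq) hhd
      have hCfuel : C'.length ≤ fuel := by
        have := congrArg List.length hTD
        simp only [List.length_append, List.length_cons] at this hfuel
        omega
      have hchainTp : pvChainT (p :: rest) fuel p = C' := by
        apply pv_chainT_eq C' p fuel (p :: rest) hchain
          (fun x hx => hsubC x (List.mem_cons_of_mem _ hx)) hlastout hCfuel
      have hstartp : pvInn p ∉ p :: rest := by
        intro hmem
        obtain ⟨xs, ys, hsp⟩ := List.append_of_mem hmem
        have hhd := hadj xs (pvInn p) ys hsp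
          (by rw [pvSucc_inn]; exact List.mem_cons_self ..)
        rw [pvSucc_inn] at hhd
        cases ys with
        | nil => simp at hhd
        | cons y ys' =>
          simp only [List.head?_cons, Option.some.injEq] at hhd
          rw [hhd] at hsp
          cases xs with
          | nil =>
            simp only [List.nil_append, List.cons.injEq] at hsp
            have : pvInn p = p := hsp.1.symm
            rcases p with ⟨a, b⟩
            simp only [pvInn, Prod.mk.injEq] at this
            omega
          | cons x xs' =>
            simp only [List.cons_append, List.cons.injEq] at hsp
            have hpmem : p ∈ rest := by
              rw [hsp.2]
              exact List.mem_append_right _ (List.mem_cons_of_mem _ (List.mem_cons_self ..))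
            exact (List.nodup_cons.mp hnd).1 hpmem
      have hnonstart : ∀ x ∈ C', pvInn x ∈ p :: rest := by
        intro x hx
        obtain ⟨y, hy, hR⟩ := pv_chain_pred C' p hchain x hx
        rw [(pvEq_succ_iff _ _).mp hR] at hy
        exact hsubC _ hy
      have hfilterC : (p :: C').filter (fun q => !decide (pvInn q ∈ p :: rest)) = [p] := by
        rw [List.filter_cons_of_pos (by simpa using hstartp)]
        congr 1
        rw [List.filter_eq_nil_iff]
        intro x hx
        simp [hnonstart x hx]
      have hfold1 : List.foldl pvStep [] (p :: C') = [(p, C')] := by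
        rw [List.foldl_cons]
        have : pvStep [] p = [(p, [])] := rfl
        rw [this]
        have := pv_run C' p [] (by simpa using hchain)
        simpa using this
      cases hS2eq : S₂ with
      | nil =>
        have hrest : (p :: C') = p :: rest := by rw [← hTD, hS2eq]; simp
        rw [← hrest]
        rw [hfold1]
        unfold pvSpecRuns
        rw [hrest] at hfilterC ⊢
        rw [hfilterC]
        simp [hchainTp]
      | cons q₂ t₂ =>
        have hbr := pvTakeT_break rest p q₂ t₂ (by rw [← hS₂]; exact hS2eq)
        have hstep2 : List.foldl pvStep [] (p :: rest)
            = List.foldl pvStep [] S₂ ++ [(p, C')] := by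
          rw [← hTD, List.foldl_append, hfold1, hS2eq, List.foldl_cons]
          have hcond : pvStep [(p, C')] q₂ = [(q₂, []), (p, C')] := by
            simp only [pvStep]
            rw [if_neg (fun hcc => hbr ((pvEq_succ_iff _ _).mpr hcc))]
          rw [hcond, pv_step_tail t₂ (q₂, []) [(p, C')], List.foldl_cons]
          rfl
        have hlen₂ : S₂.length ≤ n := by
          have h1 := pvDropT_length rest p
          rw [← hS₂] at h1
          simp only [List.length_cons] at hlen
          omega
        have hfuel₂ : S₂.length ≤ fuel := by
          have h1 := pvDropT_length rest p
          rw [← hS₂] at h1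
          simp only [List.length_cons] at hfuel
          omega
        have hih := ih S₂ hlen₂ fuel hfuel₂ hadj₂ hnd₂
        have hstartmem : ∀ y ∈ S₂, (pvInn y ∈ p :: rest) ↔ (pvInn y ∈ S₂) := by
          intro y hy
          constructor
          · intro hmem
            rw [← hTD] at hmem
            rcases List.mem_append.mp hmem with hin | hin
            · exfalso
              obtain ⟨cs, cs', hcp⟩ := List.append_of_mem hin
              have hdec : p :: rest = cs ++ pvInn y :: (cs' ++ S₂) := by
                rw [← hTD, hcp]; simp
              have hhd := hadj _ _ _ hdec (by rw [pvSucc_inn]; exact hsub₂ _ hy)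
              rw [pvSucc_inn] at hhd
              cases cs' with
              | nil =>
                have hlasteq : C'.getLastD p = pvInn y := by
                  have h1 : (p :: C').getLastD p = (cs ++ [pvInn y]).getLastD p := by
                    rw [hcp]
                  rw [List.getLastD_cons] at h1
                  simp only [List.getLastD_concat] at h1
                  exact h1
                rw [hS2eq] at hhd
                simp only [List.nil_append, List.head?_cons, Option.some.injEq] at hhd
                apply hbr
                rw [hlasteq, pvSucc_inn, hhd]
              | cons d cs'' =>
                simp only [List.cons_append, List.head?_cons, Option.some.injEq] at hhd
                apply hdisj y _ hy
                rw [hcp, hhd]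
                exact List.mem_append_right _
                  (List.mem_cons_of_mem _ (List.mem_cons_self ..))
            · exact hin
          · exact hsub₂ _
        have htransfer : ∀ y ∈ S₂, (pvSucc y ∈ p :: rest ↔ pvSucc y ∈ S₂) := by
          intro y hy
          constructor
          · intro hmem
            obtain ⟨as, bs, hsp⟩ := List.append_of_mem hy
            have hdec : p :: rest = ((p :: C') ++ as) ++ y :: bs := by
              rw [← hTD, hsp]; simp
            have hhd := hadj _ _ _ hdec hmem
            cases bs with
            | nil => simp at hhd
            | cons b bs' =>
              simp only [List.head?_cons, Option.some.injEq] at hhd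
              rw [hsp, ← hhd]
              exact List.mem_append_right _
                (List.mem_cons_of_mem _ (List.mem_cons_self ..))
          · exact hsub₂ _
        have hspecS : pvSpecRuns (p :: rest) fuel = (p, C') :: pvSpecRuns S₂ fuel := by
          unfold pvSpecRuns
          set pr : (Int × Int) → Bool := fun q => !decide (pvInn q ∈ p :: rest) with hpr
          have hfsplit : List.filter pr (p :: rest) = [p] ++ List.filter pr S₂ := by
            conv_lhs => rw [← hTD]
            rw [List.filter_append, hfilterC]
          rw [hfsplit]
          have hfcongr : List.filter pr S₂
              = S₂.filter (fun q => !decide (pvInn q ∈ S₂)) := by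
            rw [hpr]
            exact List.filter_congr
              (fun q hq => by rw [decide_eq_decide.mpr (hstartmem q hq)])
          rw [hfcongr, List.singleton_append, List.map_cons, hchainTp]
          congr 1
          apply List.map_congr_left
          intro q hq
          have hqS₂ : q ∈ S₂ := List.mem_of_mem_filter hq
          rw [pv_chainT_sub fuel q (p :: rest) S₂ hqS₂ htransfer]
        rw [hstep2, hih, hspecS]
        simp

-- run heads strictly increase along the accumulator when openers strictly decrease
lemma pv_runs_heads : ∀ (S : List (Int × Int)) (acc : List ((Int × Int) × List (Int × Int))),
    S.Pairwise (fun a b => b.1 < a.1) →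
    acc.Pairwise (fun r r' => r.1.1 < r'.1.1) →
    (∀ q ∈ S, ∀ r ∈ acc, q.1 < r.1.1) →
    (S.foldl pvStep acc).Pairwise (fun r r' => r.1.1 < r'.1.1) := by
  intro S
  induction S with
  | nil => intro acc _ hacc _; simpa using hacc
  | cons q S' ih =>
    intro acc hS hacc hcross
    obtain ⟨hq, hS'⟩ := List.pairwise_cons.mp hS
    simp only [List.foldl_cons]
    cases acc with
    | nil =>
      apply ih _ hS'
      · exact List.pairwise_singleton _ _
      · intro q' hq' r hr
        simp only [pvStep, List.mem_singleton] at hr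
        subst hr
        exact hq q' hq'
    | cons g tail =>
      rcases g with ⟨h, t⟩
      simp only [pvStep]
      by_cases hc : t.getLastD h = pvInn q
      · rw [if_pos hc]
        apply ih _ hS'
        · obtain ⟨hhd, htl⟩ := List.pairwise_cons.mp hacc
          exact List.pairwise_cons.mpr ⟨fun r hr => hhd r hr, htl⟩
        · intro q' hq' r hr
          rcases List.mem_cons.mp hr with rfl | hr'
          · exact hcross q' (List.mem_cons_of_mem _ hq') (h, t) (List.mem_cons_self ..)
          · exact hcross q' (List.mem_cons_of_mem _ hq') r (List.mem_cons_of_mem _ hr')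
      · rw [if_neg hc]
        apply ih _ hS'
        · apply List.pairwise_cons.mpr
          refine ⟨fun r hr => hcross q (List.mem_cons_self ..) r hr, hacc⟩
        · intro q' hq' r hr
          rcases List.mem_cons.mp hr with rfl | hr'
          · exact hq q' hq'
          · exact hcross q' (List.mem_cons_of_mem _ hq') r hr'

-- invariants of the matching pass: closers strictly increase, openers are distinct
lemma pv_pairs_inv : ∀ (l : List (Int × Char)) (st : List Int),
    l.Pairwise (fun a b => a.1 < b.1) →
    (∀ x ∈ st, ∀ p ∈ l, x < p.1) →
    st.Pairwise (· > ·) →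
    ((pvPairs l st).2.Pairwise (fun a b => a.2 < b.2) ∧
     ((pvPairs l st).2.map Prod.fst).Nodup ∧
     (∀ q ∈ (pvPairs l st).2, (q.1 ∈ st ∨ q.1 ∈ l.map Prod.fst) ∧ q.2 ∈ l.map Prod.fst)) := by
  intro l
  induction l with
  | nil =>
    intro st _ _ _
    refine ⟨List.Pairwise.nil, List.nodup_nil, by intro q hq; simp [pvPairs] at hq⟩
  | cons x rest ih =>
    rcases x with ⟨i, s⟩
    intro st hl hst hstp
    obtain ⟨hihd, hltl⟩ := List.pairwise_cons.mp hl
    by_cases hs : s = '('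
    · simp only [pvPairs, if_pos hs]
      have hst' : ∀ x ∈ i :: st, ∀ p ∈ rest, x < p.1 := by
        intro x hx p hp
        rcases List.mem_cons.mp hx with rfl | hx'
        · exact hihd p hp
        · exact hst x hx' p (List.mem_cons_of_mem _ hp)
      have hstp' : (i :: st).Pairwise (· > ·) := by
        apply List.pairwise_cons.mpr
        exact ⟨fun x hx => hst x hx (i, s) (List.mem_cons_self ..), hstp⟩
      obtain ⟨h1, h2, h3⟩ := ih (i :: st) hltl hst' hstp'
      refine ⟨h1, h2, ?_⟩
      intro q hq
      obtain ⟨h4, h5⟩ := h3 q hq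
      constructor
      · rcases h4 with h4 | h4
        · rcases List.mem_cons.mp h4 with rfl | h4'
          · right; simp
          · left; exact h4'
        · right; simp only [List.map_cons]; exact List.mem_cons_of_mem _ h4
      · simp only [List.map_cons]; exact List.mem_cons_of_mem _ h5
    · by_cases hs2 : s = ')'
      · cases st with
        | nil =>
          simp only [pvPairs, if_neg hs, if_pos hs2]
          obtain ⟨h1, h2, h3⟩ := ih [] hltl (by simp) (by simp)
          refine ⟨h1, h2, ?_⟩
          intro q hq
          obtain ⟨h4, h5⟩ := h3 q hq
          refine ⟨?_, List.mem_cons_of_mem _ h5⟩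
          rcases h4 with h4 | h4
          · simp at h4
          · right; exact List.mem_cons_of_mem _ h4
        | cons o st' =>
          simp only [pvPairs, if_neg hs, if_pos hs2]
          have hst' : ∀ x ∈ st', ∀ p ∈ rest, x < p.1 := by
            intro x hx p hp
            exact hst x (List.mem_cons_of_mem _ hx) p (List.mem_cons_of_mem _ hp)
          have hstp' : st'.Pairwise (· > ·) := (List.pairwise_cons.mp hstp).2
          obtain ⟨h1, h2, h3⟩ := ih st' hltl hst' hstp'
          refine ⟨?_, ?_, ?_⟩
          · apply List.pairwise_cons.mpr
            refine ⟨?_, h1⟩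
            intro q hq
            obtain ⟨_, h5⟩ := h3 q hq
            obtain ⟨k, hk, hkeq⟩ := List.mem_map.mp h5
            rw [← hkeq]
            exact hihd k hk
          · simp only [List.map_cons]
            apply List.nodup_cons.mpr
            refine ⟨?_, h2⟩
            intro hmem
            obtain ⟨q, hq, hqeq⟩ := List.mem_map.mp hmem
            obtain ⟨h4, _⟩ := h3 q hq
            rcases h4 with h4 | h4
            · have := (List.pairwise_cons.mp hstp).1 q.1 h4
              omega
            · obtain ⟨k, hk, hkeq⟩ := List.mem_map.mp h4
              have h6 := hihd k hk
              have h7 := hst o (List.mem_cons_self ..) (i, s) (List.mem_cons_self ..)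
              rw [← hkeq] at hqeq
              simp only at h6 h7
              omega
          · intro q hq
            rcases List.mem_cons.mp hq with rfl | hq'
            · exact ⟨Or.inl (List.mem_cons_self ..), by simp⟩
            · obtain ⟨h4, h5⟩ := h3 q hq'
              constructor
              · rcases h4 with h4 | h4
                · left; exact List.mem_cons_of_mem _ h4
                · right; simp only [List.map_cons]; exact List.mem_cons_of_mem _ h4
              · simp only [List.map_cons]; exact List.mem_cons_of_mem _ h5
      · simp only [pvPairs, if_neg hs, if_neg hs2]
        have hst' : ∀ x ∈ st, ∀ p ∈ rest, x < p.1 := by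
          intro x hx p hp
          exact hst x hx p (List.mem_cons_of_mem _ hp)
        obtain ⟨h1, h2, h3⟩ := ih st hltl hst' hstp
        refine ⟨h1, h2, ?_⟩
        intro q hq
        obtain ⟨h4, h5⟩ := h3 q hq
        refine ⟨?_, List.mem_cons_of_mem _ h5⟩
        rcases h4 with h4 | h4
        · left; exact h4
        · right; exact List.mem_cons_of_mem _ h4

-- the table pass records exactly the matched pairs, in order
lemma pv_table_inv : ∀ (l : List (Int × Char)) (st : List Int) (d : PySem.Dict Int Int),
    (∀ x ∈ st, d.contains x = false) →
    (∀ p ∈ l, d.contains p.1 = false) →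
    st.Pairwise (· > ·) →
    l.Pairwise (fun a b => a.1 < b.1) →
    (∀ x ∈ st, ∀ p ∈ l, x < p.1) →
    (pvLoopTable l st d).2.items = d.items ++ (pvPairs l st).2 := by
  intro l
  induction l with
  | nil => intro st d _ _ _ _ _; simp [pvLoopTable, pvPairs]
  | cons x rest ih =>
    rcases x with ⟨i, s⟩
    intro st d h1 h2 hstp hl hstl
    obtain ⟨hihd, hltl⟩ := List.pairwise_cons.mp hl
    by_cases hs : s = '('
    · simp only [pvLoopTable, pvPairs, if_pos hs]
      apply ih (i :: st) d
      · intro x hx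
        rcases List.mem_cons.mp hx with h | hx'
        · have h3 := h2 (i, s) (List.mem_cons_self ..)
          simpa [h] using h3
        · exact h1 x hx'
      · intro p hp; exact h2 p (List.mem_cons_of_mem _ hp)
      · apply List.pairwise_cons.mpr
        exact ⟨fun x hx => hstl x hx (i, s) (List.mem_cons_self ..), hstp⟩
      · exact hltl
      · intro x hx p hp
        rcases List.mem_cons.mp hx with rfl | hx'
        · exact hihd p hp
        · exact hstl x hx' p (List.mem_cons_of_mem _ hp)
    · by_cases hs2 : s = ')'
      · cases st with
        | nil =>
          simp only [pvLoopTable, pvPairs, if_neg hs, if_pos hs2]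
          apply ih [] d (by simp)
            (fun p hp => h2 p (List.mem_cons_of_mem _ hp)) (by simp) hltl (by simp)
        | cons o st' =>
          simp only [pvLoopTable, pvPairs, if_neg hs, if_pos hs2]
          have hins := PySem.Dict.items_insert_of_not_contains d (k := o) i
            (h1 o (List.mem_cons_self ..))
          have holt : ∀ p ∈ rest, o < p.1 := by
            intro p hp
            have h3 := hstl o (List.mem_cons_self ..) (i, s) (List.mem_cons_self ..)
            have h4 := hihd p hp
            simp only at h3
            omega
          have hrec := ih st' (d.insert o i)
            (by
              intro x hx
              rw [PySem.Dict.contains_insert]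
              have hxo : x ≠ o := by
                have := (List.pairwise_cons.mp hstp).1 x hx
                omega
              simp [hxo, h1 x (List.mem_cons_of_mem _ hx)])
            (by
              intro p hp
              rw [PySem.Dict.contains_insert]
              have hpo : p.1 ≠ o := by have := holt p hp; omega
              simp [hpo, h2 p (List.mem_cons_of_mem _ hp)])
            ((List.pairwise_cons.mp hstp).2) hltl
            (by
              intro x hx p hp
              exact hstl x (List.mem_cons_of_mem _ hx) p (List.mem_cons_of_mem _ hp))
          rw [hrec, hins]
          simp
      · simp only [pvLoopTable, pvPairs, if_neg hs, if_neg hs2]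
        apply ih st d h1 (fun p hp => h2 p (List.mem_cons_of_mem _ hp)) hstp hltl
        intro x hx p hp
        exact hstl x hx p (List.mem_cons_of_mem _ hp)

lemma pv_keyF (r : (Int × Int) × List (Int × Int)) :
    PySem.List.pyGetD (PySem.List.pyGetD (pvToGroup (pvRunG r)) 0 []) 0 0 = r.1.1 := by
  rcases r with ⟨h, t⟩
  simp only [pvToGroup, pvRunG, List.map_cons, PySem.List.pyGetD_zero_cons]

-- ===== VERDICT (by name: the statement is the Claim_ definition above) =====
theorem find_stems_spec : Claim_equal_find_stems := by
  intro s _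
  unfold Spec_find_stems
  set l := PySem.List.enumerate s.toList 0 with hldef
  have hlpw : l.Pairwise (fun a b => a.1 < b.1) := PySem.List.pairwise_lt_enumerate _ _
  set P := (pvPairs l []).2 with hPdef
  obtain ⟨hN1, hN2, -⟩ := pv_pairs_inv l [] hlpw (by simp) (by simp)
  set table := (pvLoopTable l [] PySem.Dict.empty).2 with htabdef
  have htabitems : table.items = P := by
    have h1 := pv_table_inv l [] PySem.Dict.empty (by simp)
      (fun p _ => PySem.Dict.contains_empty _) (by simp) hlpw (by simp)
    have h2 : PySem.Dict.empty.items = ([] : List (Int × Int)) := rfl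
    rw [htabdef, h1, h2, List.nil_append]
  have hkeys : table.keys = P.map Prod.fst := by
    simp only [PySem.Dict.keys, htabitems]
  have hkeysnd : table.keys.Nodup := by rw [hkeys]; exact hN2
  set ks := PySem.List.sorted table.keys (fun k => k) true with hksdef
  set Qd := ks.map (fun o => (o, table.getD o 0)) with hQddef
  have hfA := pv_fuseA l [] []
  simp only [List.map_nil] at hfA
  have hA : find_stems s =
      PySem.List.sorted (((P.foldl pvStep []).map (pvToGroup ∘ pvRunG)).reverse)
        (fun x => PySem.List.pyGetD (PySem.List.pyGetD x 0 []) 0 0) false := by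
    have h0 : find_stems s = PySem.List.sorted
        (((pvLoopA l [] []).2.reverse).map pvToGroup)
        (fun x => PySem.List.pyGetD (PySem.List.pyGetD x 0 []) 0 0) false := rfl
    rw [h0, hfA]
    rw [← List.map_reverse, List.map_map, List.map_reverse]
  have hfB := pv_fuseB ks table []
  simp only [List.map_nil] at hfB
  have hB : find_stems_alt s =
      (Qd.foldl pvStep []).map (pvToGroup ∘ pvRunG) := by
    have h0 : find_stems_alt s = (pvLoopB ks table []).map pvToGroup := rfl
    rw [h0, hfB, List.map_map]
  have hksperm : ks.Perm table.keys := PySem.List.sorted_perm _ _ _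
  have hQdP : Qd.Perm P := by
    have h2 : Qd.Perm (table.keys.map (fun o => (o, table.getD o 0))) := hksperm.map _
    have h3 := PySem.Dict.items_eq_map_keys table hkeysnd 0
    rw [← h3, htabitems] at h2
    exact h2
  have hksnodup : ks.Nodup := (hksperm.nodup_iff).mpr hkeysnd
  have hksgt : ks.Pairwise (fun a b => b < a) := by
    have h1 := PySem.List.sorted_pairwise_rev table.keys (fun k => k)
    rw [← hksdef] at h1
    exact (h1.and hksnodup).imp (fun hab => lt_of_le_of_ne hab.1 (Ne.symm hab.2))
  have hQfst : Qd.Pairwise (fun u v => v.1 < u.1) := by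
    rw [hQddef, List.pairwise_map]
    exact hksgt
  have hPadj : pvAdj P :=
    pv_adj_of_pairwise Prod.snd (fun q => by simp [pvSucc]) P hN1
  have hQadj : pvAdj Qd := by
    apply pv_adj_of_pairwise (fun q => -q.1) (fun q => by simp only [pvSucc]; ring) Qd
    exact hQfst.imp (fun hab => by omega)
  have hPnd : P.Nodup := List.Nodup.of_map Prod.fst hN2
  have hQnd : Qd.Nodup := (hQdP.nodup_iff).mpr hPnd
  have hlen : Qd.length = P.length := hQdP.length_eq
  have hRP := pv_runs_eq P.length P le_rfl P.length le_rfl hPadj hPnd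
  have hRQ := pv_runs_eq Qd.length Qd le_rfl P.length (by omega) hQadj hQnd
  have hmemiff : ∀ x : Int × Int, x ∈ Qd ↔ x ∈ P := fun x => hQdP.mem_iff
  have hSpecPerm : (pvSpecRuns Qd P.length).Perm (pvSpecRuns P P.length) := by
    unfold pvSpecRuns
    have hfeq : Qd.filter (fun q => !decide (pvInn q ∈ Qd))
        = Qd.filter (fun q => !decide (pvInn q ∈ P)) :=
      List.filter_congr (fun q _ => by rw [decide_eq_decide.mpr (hmemiff _)])
    rw [hfeq]
    have hmapeq : ∀ q ∈ Qd.filter (fun q => !decide (pvInn q ∈ P)),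
        ((q, pvChainT Qd P.length q) : (Int × Int) × List (Int × Int))
          = (q, pvChainT P P.length q) :=
      fun q _ => by rw [pv_chainT_congr P.length q Qd P hmemiff]
    rw [List.map_congr_left hmapeq]
    exact (hQdP.filter _).map _
  have hRperm : (Qd.foldl pvStep []).Perm ((P.foldl pvStep []).reverse) := by
    rw [hRP, hRQ, List.reverse_reverse]
    exact (List.reverse_perm _).trans hSpecPerm
  have hheads : (Qd.foldl pvStep []).Pairwise (fun r r' => r.1.1 < r'.1.1) :=
    pv_runs_heads Qd [] hQfst (by simp) (by simp)
  rw [hA, hB]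
  apply PySem.List.sorted_eq_of_perm_of_pairwise_lt
  · simpa [List.map_reverse] using hRperm.map (pvToGroup ∘ pvRunG)
  · rw [List.pairwise_map]
    exact hheads.imp
      (fun hab => by simp only [Function.comp_apply, pv_keyF]; exact hab)
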